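-- pv_equiv track=rewrite | github.com/MubarakHimself/QUANTMIND-X | src/library/core/migrations/__init__.py | _split_migration
-- ===== SOURCE A (Python) =====
-- def _split_migration(sql: str) -> tuple[str, str]:
--     """
--     Split a migration SQL file into UP and DOWN blocks.
--
--     Looks for a separator line where the first token after '--' is 'DOWN'
--     with no additional punctuation (e.g. '-- DOWN Migration' or '-- DOWN').
--     This distinguishes the actual separator from header comments like
--     '-- DOWN: Drops bot_registry table'.
--     Everything before the separator is the UP block. Everything after is
--     the DOWN block. Returns (up_sql, down_sql). Empty blocks return ''.
--     """
--     up_parts: list[str] = []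
--     down_parts: list[str] = []
--     in_down = False
--
--     for raw_line in sql.splitlines():
--         stripped = raw_line.strip()
--         # Match separator: '-- DOWN' followed by whitespace or end-of-line
--         # Reject '-- DOWN:' or '-- DOWN: description' (header comments)
--         # Accept: '-- DOWN Migration', '-- DOWN', '--  DOWN  '
--         after_dash = stripped[2:].strip() if len(stripped) > 2 else ""
--         is_separator = (
--             after_dash.upper().startswith("DOWN")
--             and (
--                 len(after_dash) == 4  # exactly "-- DOWN"
--                 or after_dash[4:5] == " "  # space after DOWN (e.g. "-- DOWN Migration")
--                 or len(after_dash) == 0  # edge case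
--             )
--         )
--         if is_separator:
--             in_down = True
--             continue
--
--         if in_down:
--             down_parts.append(raw_line)
--         else:
--             up_parts.append(raw_line)
--
--     up_sql = "\n".join(up_parts).strip()
--     down_sql = "\n".join(down_parts).strip()
--     return up_sql, down_sql
-- ===== SOURCE B (Python) =====
-- def _is_separator(raw_line: str) -> bool:
--     stripped = raw_line.strip()
--     body = stripped[2:].strip() if len(stripped) > 2 else ""
--     return body.upper().startswith("DOWN") and (len(body) == 4 or body[4:5] == " ")
--
--
-- def _split_migration(sql: str) -> tuple[str, str]:
--     lines = sql.splitlines()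
--     idx = next((i for i, line in enumerate(lines) if _is_separator(line)), None)
--     if idx is None:
--         up, down = lines, []
--     else:
--         up = lines[:idx]
--         down = [line for line in lines[idx + 1:] if not _is_separator(line)]
--     return "\n".join(up).strip(), "\n".join(down).strip()
-- ===== Notes on version B (the rewrite author's own statement) =====
-- stated objective: simpler
-- what changed: Replaces A's single stateful pass with a flag and two accumulators by: find the index of the first separator line, slice the line list into before/after, and filter remaining separators out of the after-part; the unreachable empty-body disjunct of A's separator test is dropped (an empty string never starts with DOWN).
import Mathlib
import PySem

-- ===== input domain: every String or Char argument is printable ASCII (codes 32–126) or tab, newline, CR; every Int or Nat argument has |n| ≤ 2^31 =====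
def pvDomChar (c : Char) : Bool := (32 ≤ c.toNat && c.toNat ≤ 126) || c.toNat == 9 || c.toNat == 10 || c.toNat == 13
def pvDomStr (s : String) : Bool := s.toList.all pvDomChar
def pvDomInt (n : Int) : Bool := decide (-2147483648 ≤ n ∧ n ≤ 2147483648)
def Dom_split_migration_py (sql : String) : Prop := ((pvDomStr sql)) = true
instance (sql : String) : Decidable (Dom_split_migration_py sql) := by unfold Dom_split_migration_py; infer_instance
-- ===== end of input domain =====

-- B replaces A's stateful flag loop by find-first-separator + slice + filter (objective: simpler).

-- ===== PORT A =====
-- the separator test computed inline in A's loop body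
def sepA (raw_line : String) : Bool :=
  let stripped := PySem.Str.strip raw_line
  let after_dash := if PySem.Str.len stripped > 2 then PySem.Str.strip (PySem.Str.slice stripped (some 2) none) else ""
  PySem.Str.startswith (PySem.Str.upper after_dash) "DOWN" &&
    (PySem.Str.len after_dash == 4 ||
     PySem.Str.slice after_dash (some 4) (some 5) == " " ||
     PySem.Str.len after_dash == 0)

-- A's for-loop over the lines, carrying up_parts, down_parts and in_down
def loopA : List String → List String → List String → Bool → List String × List String
  | [], up, down, _ => (up, down)
  | l :: rest, up, down, inDown =>
    if sepA l then loopA rest up down true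
    else if inDown then loopA rest up (down ++ [l]) inDown
    else loopA rest (up ++ [l]) down inDown

def split_migration_py (sql : String) : String × String :=
  let p := loopA (PySem.Str.splitlines sql) [] [] false
  (PySem.Str.strip (PySem.Str.join "\n" p.1), PySem.Str.strip (PySem.Str.join "\n" p.2))

-- ===== PORT B =====
def sepB (raw_line : String) : Bool :=
  let stripped := PySem.Str.strip raw_line
  let body := if PySem.Str.len stripped > 2 then PySem.Str.strip (PySem.Str.slice stripped (some 2) none) else ""
  PySem.Str.startswith (PySem.Str.upper body) "DOWN" &&
    (PySem.Str.len body == 4 || PySem.Str.slice body (some 4) (some 5) == " ")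

def split_migration_py_alt (sql : String) : String × String :=
  let lines := PySem.Str.splitlines sql
  let p : List String × List String :=
    match lines.findIdx? sepB with
    | none => (lines, [])
    | some i => (lines.take i, (lines.drop (i + 1)).filter (fun l => !sepB l))
  (PySem.Str.strip (PySem.Str.join "\n" p.1), PySem.Str.strip (PySem.Str.join "\n" p.2))

-- ===== PRECONDITION & SPEC =====
def Spec_split_migration_py (sql : String) (out : String × String) : Prop := out = split_migration_py_alt sql
instance (sql : String) (out : String × String) : Decidable (Spec_split_migration_py sql out) := by unfold Spec_split_migration_py; infer_instance

-- ===== CLAIM (what is proved, stated in full; the proofs are below) =====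
def Claim_equal_split_migration_py : Prop := ∀ (sql : String), Dom_split_migration_py sql → Spec_split_migration_py sql (split_migration_py sql)

-- ===== LEMMAS AND PROOFS =====

-- A's empty-body disjunct never fires: an empty string never starts with DOWN
theorem sep_body_eq (s : String) :
    (PySem.Str.startswith (PySem.Str.upper s) "DOWN" &&
      (PySem.Str.len s == 4 || PySem.Str.slice s (some 4) (some 5) == " " || PySem.Str.len s == 0))
    = (PySem.Str.startswith (PySem.Str.upper s) "DOWN" &&
      (PySem.Str.len s == 4 || PySem.Str.slice s (some 4) (some 5) == " ")) := by
  by_cases h : s.toList = []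
  · rw [String.toList_eq_nil_iff.mp h]
    decide
  · have hne : s.length ≠ 0 := by
      simpa [String.length_eq_zero_iff] using h
    have h0 : ((s.length : Int) == 0) = false := by simp [hne]
    simp [h0]

theorem sepA_eq_sepB (l : String) : sepA l = sepB l := by
  simp only [sepA, sepB, sep_body_eq]

theorem loopA_true (ls up down : List String) :
    loopA ls up down true = (up, down ++ ls.filter (fun l => !sepA l)) := by
  induction ls generalizing down with
  | nil => simp [loopA]
  | cons l rest ih =>
    by_cases h : sepA l = true <;> simp [loopA, h, ih]

theorem loopA_false (ls up down : List String) :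
    loopA ls up down false =
      match ls.findIdx? sepA with
      | none => (up ++ ls, down)
      | some i => (up ++ ls.take i, down ++ (ls.drop (i + 1)).filter (fun l => !sepA l)) := by
  induction ls generalizing up with
  | nil => simp [loopA]
  | cons l rest ih =>
    rw [List.findIdx?_cons]
    by_cases h : sepA l = true
    · simp only [loopA, h, loopA_true]
      simp
    · simp only [loopA, h]
      rw [ih (up ++ [l])]
      cases hrest : rest.findIdx? sepA <;> simp

-- ===== VERDICT (by name: the statement is the Claim_ definition above) =====
theorem split_migration_py_spec : Claim_equal_split_migration_py := by
  intro sql _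
  unfold Spec_split_migration_py split_migration_py split_migration_py_alt
  rw [loopA_false]
  simp only [funext fun l => sepA_eq_sepB l]
  cases (PySem.Str.splitlines sql).findIdx? sepB <;> simp
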